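-- pv_equiv track=rewrite | github.com/adarec1994/Fable2AssetBrowser | source/convert.py | build_faces_from_indices
-- ===== SOURCE A (Python) =====
-- from typing import List, Tuple, Optional, Dict
--
-- def build_faces_from_indices(indices: List[int], vcount: int) -> List[Tuple[int, int, int]]:
--     faces: List[Tuple[int, int, int]] = []
--     if 0xFFFF not in indices:
--         for i in range(0, len(indices) - 2, 3):
--             a, b, c = indices[i], indices[i + 1], indices[i + 2]
--             if not (a >= vcount or b >= vcount or c >= vcount or a == b or b == c or a == c):
--                 faces.append((a + 1, b + 1, c + 1))
--         return faces
--     si = 0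
--     n = len(indices)
--     while si < n:
--         try:
--             ei = indices.index(0xFFFF, si)
--         except ValueError:
--             ei = n
--         seg = indices[si:ei]
--         for t in range(2, len(seg)):
--             a, b, c = seg[t - 2], seg[t - 1], seg[t]
--             if a == b or b == c or a == c:
--                 continue
--             tri = (a, b, c) if (t % 2) == 0 else (a, c, b)
--             if all(v < vcount for v in tri):
--                 faces.append((tri[0] + 1, tri[1] + 1, tri[2] + 1))
--         si = ei + 1
--     return faces
-- ===== SOURCE B (Python) =====
-- from typing import List, Tuple
--
--
-- def build_faces_from_indices(indices: List[int], vcount: int) -> List[Tuple[int, int, int]]: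
--     # Streaming state machine: one left-to-right pass with O(1) state, no
--     # segment lists, no slicing, no index() scans, no random access.
--     faces: List[Tuple[int, int, int]] = []
--     if 0xFFFF in indices:
--         # strip mode: keep the last two vertices of the current strip and a
--         # position counter; a restart marker just resets the counter.
--         a = b = 0
--         cnt = 0
--         for x in indices:
--             if x == 0xFFFF:
--                 cnt = 0
--                 continue
--             if cnt >= 2 and not (a == b or b == x or a == x):
--                 tri = (a, b, x) if cnt % 2 == 0 else (a, x, b)
--                 if tri[0] < vcount and tri[1] < vcount and tri[2] < vcount:
--                     faces.append((tri[0] + 1, tri[1] + 1, tri[2] + 1))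
--             a, b = b, x
--             cnt += 1
--     else:
--         # list mode: a 3-state modular counter collects each triple online;
--         # a trailing incomplete triple is never emitted.
--         a = b = 0
--         m = 0
--         for x in indices:
--             if m == 0:
--                 a = x
--                 m = 1
--             elif m == 1:
--                 b = x
--                 m = 2
--             else:
--                 if a < vcount and b < vcount and x < vcount and a != b and b != x and a != x:
--                     faces.append((a + 1, b + 1, x + 1))
--                 m = 0
--     return faces
-- ===== Notes on version B (the rewrite author's own statement) =====
-- stated objective: alternative
-- what changed: B replaces A's segment materialization (index() rescans, slicing, per-segment indexed loops) with a single streaming left-to-right pass using an O(1) state machine: in strip mode it carries only the last two vertices and a position counter that a restart marker resets; in list mode a 3-state modular counter collects triples online; no slices, no random access, no segment lists.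
import Mathlib
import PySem

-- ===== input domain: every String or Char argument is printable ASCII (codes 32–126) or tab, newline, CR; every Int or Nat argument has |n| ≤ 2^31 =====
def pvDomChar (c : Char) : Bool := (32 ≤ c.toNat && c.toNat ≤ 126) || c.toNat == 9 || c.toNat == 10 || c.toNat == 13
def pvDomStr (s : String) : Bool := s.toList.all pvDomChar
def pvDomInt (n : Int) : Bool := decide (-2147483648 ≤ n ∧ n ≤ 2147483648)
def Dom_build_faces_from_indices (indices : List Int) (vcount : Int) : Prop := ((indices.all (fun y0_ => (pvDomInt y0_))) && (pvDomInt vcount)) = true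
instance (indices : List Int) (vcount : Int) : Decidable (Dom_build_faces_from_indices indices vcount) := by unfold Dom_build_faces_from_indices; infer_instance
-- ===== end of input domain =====

-- B replaces A's index()/slice segmentation with a single streaming pass holding an O(1)
-- state machine (last two vertices + position counter, reset on the restart marker);
-- objective: alternative.


-- ===== PORT A =====
-- inner body of the triangle-list loop (indexing is always in range, so pyGetD is exact here)
def pvAListStep (indices : List Int) (vcount : Int) (faces : List (Int × Int × Int)) (i : Int) :
    List (Int × Int × Int) :=
  let a := PySem.List.pyGetD indices i 0
  let b := PySem.List.pyGetD indices (i + 1) 0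
  let c := PySem.List.pyGetD indices (i + 2) 0
  if ¬(a ≥ vcount ∨ b ≥ vcount ∨ c ≥ vcount ∨ a = b ∨ b = c ∨ a = c) then
    faces ++ [(a + 1, b + 1, c + 1)]
  else faces

-- 'try: ei = indices.index(0xFFFF, si) except ValueError: ei = n' (the except clause is folded in)
def pvIndexFrom (xs : List Int) (si : Nat) : Nat :=
  match (xs.drop si).findIdx? (fun x => x == 65535) with
  | some k => si + k
  | none => xs.length

-- inner 'for t in range(2, len(seg))' loop of the restart branch
def pvASegStep (seg : List Int) (vcount : Int) (faces : List (Int × Int × Int)) (t : Int) :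
    List (Int × Int × Int) :=
  let a := PySem.List.pyGetD seg (t - 2) 0
  let b := PySem.List.pyGetD seg (t - 1) 0
  let c := PySem.List.pyGetD seg t 0
  if a = b ∨ b = c ∨ a = c then faces
  else
    let tri := if t % 2 = 0 then (a, b, c) else (a, c, b)
    if tri.1 < vcount ∧ tri.2.1 < vcount ∧ tri.2.2 < vcount then
      faces ++ [(tri.1 + 1, tri.2.1 + 1, tri.2.2 + 1)]
    else faces

-- the 'while si < n' loop; indices[si:ei] with 0 ≤ si ≤ ei is exactly (drop si).take (ei-si)
def pvAWhile (indices : List Int) (vcount : Int) (faces : List (Int × Int × Int)) (si : Nat) :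
    List (Int × Int × Int) :=
  if h : si < indices.length then
    let ei := pvIndexFrom indices si
    let seg := (indices.drop si).take (ei - si)
    pvAWhile indices vcount
      ((PySem.List.pyRange 2 (seg.length) 1).foldl (pvASegStep seg vcount) faces) (ei + 1)
  else faces
termination_by indices.length - si
decreasing_by
  simp only [pvIndexFrom]
  cases hf : (indices.drop si).findIdx? (fun x => x == 65535) with
  | none => dsimp only; omega
  | some k => dsimp only; omega

def build_faces_from_indices (indices : List Int) (vcount : Int) : List (Int × Int × Int) :=
  if ¬ (65535 ∈ indices) then
    (PySem.List.pyRange 0 ((indices.length : Int) - 2) 3).foldl (pvAListStep indices vcount) []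
  else
    pvAWhile indices vcount [] 0

-- ===== PORT B =====
-- strip mode, one streaming step: state = ((a, b), cnt) holds the last two vertices of the
-- current strip and the position counter; a restart marker only resets the counter
def pvBStep (vcount : Int) (st : (Int × Int × Nat) × List (Int × Int × Int)) (x : Int) :
    (Int × Int × Nat) × List (Int × Int × Int) :=
  let a := st.1.1
  let b := st.1.2.1
  let cnt := st.1.2.2
  let faces := st.2
  if x = 65535 then ((a, b, 0), faces)
  else
    let faces' :=
      if 2 ≤ cnt ∧ ¬(a = b ∨ b = x ∨ a = x) then
        let tri := if cnt % 2 = 0 then (a, b, x) else (a, x, b)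
        if tri.1 < vcount ∧ tri.2.1 < vcount ∧ tri.2.2 < vcount then
          faces ++ [(tri.1 + 1, tri.2.1 + 1, tri.2.2 + 1)]
        else faces
      else faces
    ((b, x, cnt + 1), faces')

-- list mode, one streaming step: a 3-state modular counter collects each triple online
def pvBListStep (vcount : Int) (st : (Int × Int × Nat) × List (Int × Int × Int)) (x : Int) :
    (Int × Int × Nat) × List (Int × Int × Int) :=
  let a := st.1.1
  let b := st.1.2.1
  let m := st.1.2.2
  let faces := st.2
  if m = 0 then ((x, b, 1), faces)
  else if m = 1 then ((a, x, 2), faces)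
  else ((a, b, 0),
    if a < vcount ∧ b < vcount ∧ x < vcount ∧ a ≠ b ∧ b ≠ x ∧ a ≠ x then
      faces ++ [(a + 1, b + 1, x + 1)]
    else faces)

def build_faces_from_indices_alt (indices : List Int) (vcount : Int) : List (Int × Int × Int) :=
  if 65535 ∈ indices then
    (indices.foldl (pvBStep vcount) ((0, 0, 0), [])).2
  else
    (indices.foldl (pvBListStep vcount) ((0, 0, 0), [])).2

-- ===== PRECONDITION & SPEC =====
def Spec_build_faces_from_indices (indices : List Int) (vcount : Int) (out : List (Int × Int × Int)) : Prop := out = build_faces_from_indices_alt indices vcount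
instance (indices : List Int) (vcount : Int) (out : List (Int × Int × Int)) : Decidable (Spec_build_faces_from_indices indices vcount out) := by unfold Spec_build_faces_from_indices; infer_instance

-- ===== CLAIM (what is proved, stated in full; the proofs are below) =====
def Claim_equal_build_faces_from_indices : Prop := ∀ (indices : List Int) (vcount : Int), Dom_build_faces_from_indices indices vcount → Spec_build_faces_from_indices indices vcount (build_faces_from_indices indices vcount)

-- ===== LEMMAS AND PROOFS =====

-- proof-only bridge: sliding triples of one marker-free segment, with parity counter t
def pvBStrip (vcount : Int) : Nat → List Int → List (Int × Int × Int)
  | _, [] => []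
  | _, [_] => []
  | _, [_, _] => []
  | t, a :: b :: c :: rest =>
      (if a = b ∨ b = c ∨ a = c then []
       else
         let tri := if (t : Int) % 2 = 0 then (a, b, c) else (a, c, b)
         if tri.1 < vcount ∧ tri.2.1 < vcount ∧ tri.2.2 < vcount then
           [(tri.1 + 1, tri.2.1 + 1, tri.2.2 + 1)]
         else []) ++ pvBStrip vcount (t + 1) (b :: c :: rest)

-- proof-only bridge: the triangle list taken three at a time
def pvBChunk (vcount : Int) : List Int → List (Int × Int × Int)
  | a :: b :: c :: rest =>
      (if a < vcount ∧ b < vcount ∧ c < vcount ∧ a ≠ b ∧ b ≠ c ∧ a ≠ c then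
        [(a + 1, b + 1, c + 1)] else []) ++ pvBChunk vcount rest
  | _ => []

theorem pyRange3_nil (a b : Int) (h : b ≤ a) : PySem.List.pyRange a b 3 = [] := by
  rw [PySem.List.pyRange_of_pos a b (by norm_num)]
  simp [show ¬ a < b by omega]

theorem pyRange3_cons (a b : Int) (h : a < b) :
    PySem.List.pyRange a b 3 = a :: PySem.List.pyRange (a + 3) b 3 := by
  rw [PySem.List.pyRange_of_pos a b (by norm_num), PySem.List.pyRange_of_pos (a+3) b (by norm_num)]
  have hc : ((b - a + 3 - 1) / 3).toNat = ((b - (a+3) + 3 - 1) / 3).toNat + 1 := by omega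
  simp only [if_pos h]
  by_cases h3 : a + 3 < b
  · simp only [if_pos h3, hc, List.range_succ_eq_map, List.map_cons, List.map_map]
    refine List.cons_eq_cons.mpr ⟨by ring, ?_⟩
    apply List.map_congr_left; intro k _; simp only [Function.comp_apply, Nat.succ_eq_add_one]
    push_cast; ring
  · have : ((b - (a+3) + 3 - 1) / 3).toNat = 0 := by omega
    simp only [if_neg h3, hc, this, List.range_succ_eq_map, List.range_zero, List.map_nil,
      List.map_cons]
    refine List.cons_eq_cons.mpr ⟨by ring, rfl⟩

theorem getD_append_at (pre l : List Int) (k : Nat) :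
    PySem.List.pyGetD (pre ++ l) ((pre.length + k : Nat) : Int) 0 = l.getD k 0 := by
  rw [PySem.List.pyGetD_natCast]
  rw [List.getD_eq_getElem?_getD, List.getD_eq_getElem?_getD,
    List.getElem?_append_right (by omega)]
  simp

theorem listb (vcount : Int) : ∀ (xs pre : List Int) (acc : List (Int × Int × Int)),
    (PySem.List.pyRange (pre.length : Int) (((pre.length + xs.length : Nat) : Int) - 2) 3).foldl
        (pvAListStep (pre ++ xs) vcount) acc = acc ++ pvBChunk vcount xs
  | [], pre, acc => by
      rw [pyRange3_nil _ _ (by simp)]; simp [pvBChunk]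
  | [a], pre, acc => by
      rw [pyRange3_nil _ _ (by simp)]; simp [pvBChunk]
  | [a,b], pre, acc => by
      rw [pyRange3_nil _ _ (by simp)]; simp [pvBChunk]
  | a :: b :: c :: rest, pre, acc => by
      rw [pyRange3_cons _ _ (by simp; omega), List.foldl_cons]
      have ha := getD_append_at pre (a :: b :: c :: rest) 0
      have hb := getD_append_at pre (a :: b :: c :: rest) 1
      have hc := getD_append_at pre (a :: b :: c :: rest) 2
      have e0 : ((pre.length + 0 : Nat) : Int) = (pre.length : Int) := by omega
      have e1 : ((pre.length + 1 : Nat) : Int) = (pre.length : Int) + 1 := by omega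
      have e2 : ((pre.length + 2 : Nat) : Int) = (pre.length : Int) + 2 := by omega
      rw [e0] at ha; rw [e1] at hb; rw [e2] at hc
      have ih := listb vcount rest (pre ++ [a, b, c])
        (pvAListStep (pre ++ a :: b :: c :: rest) vcount acc (pre.length : Int))
      have eapp : (pre ++ [a, b, c]) ++ rest = pre ++ a :: b :: c :: rest := by simp
      have elen : (((pre ++ [a, b, c]).length : Int)) = (pre.length : Int) + 3 := by simp
      have estop : ((((pre ++ [a,b,c]).length + rest.length : Nat) : Int) - 2)
          = (((pre.length + (a :: b :: c :: rest).length : Nat) : Int) - 2) := by simp; omega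
      rw [eapp, elen, estop] at ih
      rw [ih]
      simp only [pvAListStep, pvBChunk, ha, hb, hc, List.getD_cons_zero, List.getD_cons_succ]
      split_ifs with h1 h2 <;> simp_all <;> omega

theorem stripb (vcount : Int) : ∀ (tail pre : List Int) (acc : List (Int × Int × Int)),
    (PySem.List.pyRange ((pre.length : Int) + 2) (((pre ++ tail).length : Nat) : Int) 1).foldl
        (pvASegStep (pre ++ tail) vcount) acc = acc ++ pvBStrip vcount (pre.length + 2) tail
  | [], pre, acc => by
      rw [PySem.List.pyRange_one_eq_nil (by simp)]; simp [pvBStrip]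
  | [x], pre, acc => by
      rw [PySem.List.pyRange_one_eq_nil (by simp)]; simp [pvBStrip]
  | [x, y], pre, acc => by
      rw [PySem.List.pyRange_one_eq_nil (by simp)]; simp [pvBStrip]
  | a :: b :: c :: rest, pre, acc => by
      rw [PySem.List.pyRange_one_cons (by simp; omega), List.foldl_cons]
      have ha := getD_append_at pre (a :: b :: c :: rest) 0
      have hb := getD_append_at pre (a :: b :: c :: rest) 1
      have hc := getD_append_at pre (a :: b :: c :: rest) 2
      have e0 : ((pre.length + 0 : Nat) : Int) = (pre.length : Int) + 2 - 2 := by omega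
      have e1 : ((pre.length + 1 : Nat) : Int) = (pre.length : Int) + 2 - 1 := by omega
      have e2 : ((pre.length + 2 : Nat) : Int) = (pre.length : Int) + 2 := by omega
      rw [e0] at ha; rw [e1] at hb; rw [e2] at hc
      have ih := stripb vcount (b :: c :: rest) (pre ++ [a])
        (pvASegStep (pre ++ a :: b :: c :: rest) vcount acc ((pre.length : Int) + 2))
      have eapp : (pre ++ [a]) ++ (b :: c :: rest) = pre ++ a :: b :: c :: rest := by simp
      have elen : (((pre ++ [a]).length : Int) + 2) = (pre.length : Int) + 2 + 1 := by simp; omega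
      rw [eapp, elen] at ih
      rw [ih]
      simp only [pvASegStep, pvBStrip, ha, hb, hc, List.getD_cons_zero, List.getD_cons_succ,
        List.length_append, List.length_cons, List.length_nil]
      rw [show ((pre.length : Int) + 2 - 2) = ((pre.length : Nat) : Int) from by omega] at ha
      by_cases hd : a = b ∨ b = c ∨ a = c
      · simp [hd]
      · simp only [if_neg hd]
        by_cases hp : ((pre.length : Int) + 2) % 2 = 0
        · rw [if_pos hp, if_pos (by omega : (((pre.length + 2 : Nat)) : Int) % 2 = 0)]
          split_ifs <;> simp
        · rw [if_neg hp, if_neg (by omega : ¬ (((pre.length + 2 : Nat)) : Int) % 2 = 0)]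
          split_ifs <;> simp

theorem seg_loop_eq (vcount : Int) (seg : List Int) (acc : List (Int × Int × Int)) :
    (PySem.List.pyRange 2 (seg.length) 1).foldl (pvASegStep seg vcount) acc
      = acc ++ pvBStrip vcount 2 seg := by
  have h := stripb vcount seg [] acc
  simpa using h

-- streaming strip fold over a marker-free tail with window (a, b) at position t ≥ 2
theorem segGen (v : Int) : ∀ (l : List Int) (a b : Int) (t : Nat)
    (acc : List (Int × Int × Int)), (∀ x ∈ l, x ≠ 65535) → 2 ≤ t →
    ∃ a' b', l.foldl (pvBStep v) ((a, b, t), acc)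
      = ((a', b', t + l.length), acc ++ pvBStrip v t (a :: b :: l))
  | [], a, b, t, acc, _, _ => ⟨a, b, by simp [pvBStrip]⟩
  | x :: l, a, b, t, acc, hm, ht => by
      have hx : x ≠ 65535 := hm x (by simp)
      rw [List.foldl_cons]
      have hstep : pvBStep v ((a, b, t), acc) x
          = ((b, x, t + 1),
            acc ++ (if a = b ∨ b = x ∨ a = x then []
              else
                let tri := if (t : Int) % 2 = 0 then (a, b, x) else (a, x, b)
                if tri.1 < v ∧ tri.2.1 < v ∧ tri.2.2 < v then
                  [(tri.1 + 1, tri.2.1 + 1, tri.2.2 + 1)] else [])) := by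
        simp only [pvBStep, if_neg hx]
        by_cases hd : a = b ∨ b = x ∨ a = x
        · simp [hd, ht]
        · have hcp : ((t : Int) % 2 = 0) ↔ (t % 2 = 0) := by omega
          simp only [if_neg hd, if_pos (show 2 ≤ t ∧ ¬(a = b ∨ b = x ∨ a = x) from ⟨ht, hd⟩), hcp]
          split_ifs <;> simp
      rw [hstep]
      obtain ⟨a', b', ih⟩ := segGen v l b x (t + 1) _ (fun y hy => hm y (by simp [hy]))
        (by omega)
      refine ⟨a', b', ?_⟩
      rw [ih]
      simp only [pvBStrip, List.length_cons, List.append_assoc, Prod.mk.injEq,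
        true_and, and_true]
      all_goals omega

theorem segFull (v : Int) (seg : List Int) (a b : Int) (acc : List (Int × Int × Int))
    (hm : ∀ x ∈ seg, x ≠ 65535) :
    ∃ a' b', seg.foldl (pvBStep v) ((a, b, 0), acc)
      = ((a', b', seg.length), acc ++ pvBStrip v 2 seg) := by
  match seg with
  | [] => exact ⟨a, b, by simp [pvBStrip]⟩
  | [x] =>
      refine ⟨b, x, ?_⟩
      have hx : x ≠ 65535 := hm x (by simp)
      simp [pvBStep, hx, pvBStrip]
  | x :: y :: l =>
      have hx : x ≠ 65535 := hm x (by simp)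
      have hy : y ≠ 65535 := hm y (by simp)
      rw [List.foldl_cons, List.foldl_cons]
      have h1 : pvBStep v ((a, b, 0), acc) x = ((b, x, 1), acc) := by simp [pvBStep, hx]
      have h2 : pvBStep v ((b, x, 1), acc) y = ((x, y, 2), acc) := by simp [pvBStep, hy]
      rw [h1, h2]
      obtain ⟨a', b', ih⟩ := segGen v l x y 2 acc
        (fun z hz => hm z (by simp [hz])) (by omega)
      refine ⟨a', b', ?_⟩
      rw [ih]
      rw [show (x :: y :: l).length = 2 + l.length from by simp only [List.length_cons]; omega]

-- the list-mode streaming fold equals the chunked triangle list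
theorem listStream (v : Int) : ∀ (xs : List Int) (a b : Int) (acc : List (Int × Int × Int)),
    (xs.foldl (pvBListStep v) ((a, b, 0), acc)).2 = acc ++ pvBChunk v xs
  | [], a, b, acc => by simp [pvBChunk]
  | [x], a, b, acc => by simp [pvBListStep, pvBChunk]
  | [x, y], a, b, acc => by simp [pvBListStep, pvBChunk]
  | x :: y :: z :: rest, a, b, acc => by
      rw [List.foldl_cons, List.foldl_cons, List.foldl_cons]
      have h1 : pvBListStep v ((a, b, 0), acc) x = ((x, b, 1), acc) := by simp [pvBListStep]
      have h2 : pvBListStep v ((x, b, 1), acc) y = ((x, y, 2), acc) := by simp [pvBListStep]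
      have h3 : pvBListStep v ((x, y, 2), acc) z = ((x, y, 0),
          if x < v ∧ y < v ∧ z < v ∧ x ≠ y ∧ y ≠ z ∧ x ≠ z then
            acc ++ [(x + 1, y + 1, z + 1)] else acc) := by simp [pvBListStep]
      rw [h1, h2, h3]
      rw [listStream v rest x y _]
      simp only [pvBChunk]
      split_ifs <;> simp

-- the A while-loop equals the streaming strip fold, for any stale window at counter 0
theorem while_eq (v : Int) (indices : List Int) (si : Nat) (a b : Int)
    (acc : List (Int × Int × Int)) :
    pvAWhile indices v acc si
      = ((indices.drop si).foldl (pvBStep v) ((a, b, 0), acc)).2 := by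
  by_cases h : si < indices.length
  · rw [pvAWhile, dif_pos h]
    cases hf : (indices.drop si).findIdx? (fun x => x == 65535) with
    | none =>
        have hei : pvIndexFrom indices si = indices.length := by
          simp [pvIndexFrom, hf]
        have hnm : ∀ x ∈ indices.drop si, x ≠ 65535 := by
          intro x hx
          have := List.findIdx?_eq_none_iff.mp hf x hx
          simpa using this
        have hseg : (indices.drop si).take (pvIndexFrom indices si - si) = indices.drop si := by
          rw [hei]
          have : indices.length - si = (indices.drop si).length := by simp
          rw [this, List.take_length]
        have hrec := while_eq v indices (pvIndexFrom indices si + 1) a b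
          ((PySem.List.pyRange 2 (((indices.drop si).take (pvIndexFrom indices si - si)).length) 1).foldl
            (pvASegStep ((indices.drop si).take (pvIndexFrom indices si - si)) v) acc)
        have hdrop : indices.drop (pvIndexFrom indices si + 1) = [] := by
          apply List.drop_eq_nil_of_le; omega
        rw [hrec, hdrop]
        rw [seg_loop_eq, hseg]
        obtain ⟨a2, b2, hsf⟩ := segFull v (indices.drop si) a b acc hnm
        rw [hsf]
        rfl
    | some k =>
        have hk := List.findIdx?_eq_some_iff_getElem.mp hf
        obtain ⟨hklt, hkval, hkmin⟩ := hk
        have hkm : (indices.drop si)[k] = 65535 := by simpa using hkval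
        have hei : pvIndexFrom indices si = si + k := by simp [pvIndexFrom, hf]
        have hseg : (indices.drop si).take (pvIndexFrom indices si - si)
            = (indices.drop si).take k := by
          rw [hei]; congr 1; omega
        have hnm : ∀ x ∈ (indices.drop si).take k, x ≠ 65535 := by
          intro x hx
          obtain ⟨j, hj, hxj⟩ := List.getElem_of_mem hx
          have hjk : j < k := by
            have := hj; simp [List.length_take] at this; omega
          have hne := hkmin j hjk
          rw [List.getElem_take] at hxj
          rw [hxj] at hne
          simpa using hne
        have hklen : ((indices.drop si).take k).length = k := by
          rw [List.length_take]; omega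
        have hdecomp : indices.drop si
            = (indices.drop si).take k ++ 65535 :: (indices.drop si).drop (k + 1) := by
          conv_lhs => rw [← List.take_append_drop k (indices.drop si)]
          congr 1
          rw [List.drop_eq_getElem_cons hklt, hkm]
        obtain ⟨a2, b2, hsf⟩ := segFull v ((indices.drop si).take k) a b acc hnm
        have hrec := while_eq v indices (pvIndexFrom indices si + 1) a2 b2
          ((PySem.List.pyRange 2 (((indices.drop si).take (pvIndexFrom indices si - si)).length) 1).foldl
            (pvASegStep ((indices.drop si).take (pvIndexFrom indices si - si)) v) acc)
        have hdrop2 : indices.drop (pvIndexFrom indices si + 1)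
            = (indices.drop si).drop (k + 1) := by
          rw [List.drop_drop]
          congr 1; omega
        rw [hrec, hdrop2, hseg, seg_loop_eq]
        conv_rhs => rw [hdecomp]
        rw [List.foldl_append, List.foldl_cons, hsf, hklen]
        have hmark : pvBStep v ((a2, b2, k), acc ++ pvBStrip v 2 ((indices.drop si).take k)) 65535
            = ((a2, b2, 0), acc ++ pvBStrip v 2 ((indices.drop si).take k)) := by
          simp [pvBStep]
        rw [hmark]
  · rw [pvAWhile, dif_neg h]
    have hd : indices.drop si = [] := List.drop_eq_nil_of_le (by omega)
    simp [hd]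
termination_by indices.length - si
decreasing_by
  all_goals
    try simp only [List.length_drop] at hklt
    omega

theorem list_branch_eq (vcount : Int) (indices : List Int) (acc : List (Int × Int × Int)) :
    (PySem.List.pyRange 0 ((indices.length : Int) - 2) 3).foldl (pvAListStep indices vcount) acc
      = acc ++ pvBChunk vcount indices := by
  have h := listb vcount indices [] acc
  simpa using h

-- ===== VERDICT (by name: the statement is the Claim_ definition above) =====
theorem build_faces_from_indices_spec : Claim_equal_build_faces_from_indices := by
  intro indices vcount _
  unfold Spec_build_faces_from_indices build_faces_from_indices build_faces_from_indices_alt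
  by_cases h : 65535 ∈ indices
  · simp only [h, if_true, not_true, if_false]
    have := while_eq vcount indices 0 0 0 []
    simpa using this
  · simp only [h, if_false, not_false_iff, if_true]
    rw [listStream vcount indices 0 0 []]
    simpa using list_branch_eq vcount indices []
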